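-- pv_equiv track=rewrite | github.com/eliottcassidy2000/math | 04-computation/arc_reversal_q009.py | adj_count
-- ===== SOURCE A (Python) =====
-- from itertools import permutations
--
-- def adj_count(T, i, j, excluded_vertices=None):
--     """Count Hamiltonian paths of T (excluding some vertices) where i immediately precedes j."""
--     n = len(T)
--     if excluded_vertices is None:
--         excluded_vertices = set()
--     verts = [u for u in range(n) if u not in excluded_vertices]
--     count = 0
--     for perm in permutations(verts):
--         valid = True
--         for k in range(len(perm) - 1):
--             if T[perm[k]][perm[k + 1]] != 1:
--                 valid = False
--                 break
--         if valid:
--             for k in range(len(perm) - 1):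
--                 if perm[k] == i and perm[k + 1] == j:
--                     count += 1
--     return count
-- ===== SOURCE B (Python) =====
-- def adj_count(T, i, j, excluded_vertices=None):
--     """Count Hamiltonian paths of T (excluding some vertices) where i immediately precedes j."""
--     n = len(T)
--     if excluded_vertices is None:
--         excluded_vertices = set()
--     verts = [u for u in range(n) if u not in excluded_vertices]
--
--     def go(last, remaining, seen):
--         if not remaining:
--             return 1 if seen else 0
--         total = 0
--         for k, v in enumerate(remaining):
--             if T[last][v] == 1:
--                 total += go(v, remaining[:k] + remaining[k + 1:],
--                             seen or (last == i and v == j))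
--         return total
--
--     if not verts:
--         return 0
--     return sum(go(u, verts[:k] + verts[k + 1:], False)
--                for k, u in enumerate(verts))
-- ===== Notes on version B (the rewrite author's own statement) =====
-- stated objective: faster
-- what changed: replaces brute-force enumeration of all permutations (each then checked edge-by-edge) with a recursive backtracking search that only ever extends edge-valid path prefixes, threading a boolean flag for whether the i->j step has been used
import Mathlib
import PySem

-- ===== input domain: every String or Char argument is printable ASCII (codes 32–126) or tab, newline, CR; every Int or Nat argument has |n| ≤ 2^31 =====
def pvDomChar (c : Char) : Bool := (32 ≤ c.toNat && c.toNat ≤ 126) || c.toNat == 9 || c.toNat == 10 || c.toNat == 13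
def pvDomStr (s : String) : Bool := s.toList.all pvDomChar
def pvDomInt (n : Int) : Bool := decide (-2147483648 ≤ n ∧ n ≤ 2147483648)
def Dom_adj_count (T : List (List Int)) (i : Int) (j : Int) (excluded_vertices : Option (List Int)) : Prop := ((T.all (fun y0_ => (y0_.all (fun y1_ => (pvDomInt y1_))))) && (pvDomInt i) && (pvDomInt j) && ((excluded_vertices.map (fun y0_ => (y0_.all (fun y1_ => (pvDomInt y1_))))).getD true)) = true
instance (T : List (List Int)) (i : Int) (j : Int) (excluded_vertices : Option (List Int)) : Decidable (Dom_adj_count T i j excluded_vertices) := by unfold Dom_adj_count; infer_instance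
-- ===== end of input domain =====

-- B replaces A's enumeration of all permutations by a backtracking search that only
-- extends edge-valid prefixes (objective: faster by pruning; same exact count).

-- ===== PORT A =====
-- verts = [u for u in range(len(T)) if u not in excluded_vertices]  (shared by both ports and Pre_)
def pvVerts (T : List (List Int)) (excluded_vertices : Option (List Int)) : List Int :=
  (PySem.List.pyRange 0 (T.length : Int) 1).filter
    (fun u => !((excluded_vertices.getD []).contains u))

-- T[u][v]; total via defaults, exact whenever both indexes are in range (guaranteed by Pre_)
def pvGetT (T : List (List Int)) (u v : Int) : Int :=
  PySem.List.pyGetD (PySem.List.pyGetD T u ([] : List Int)) v 0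

-- the 'valid' loop: for k in range(len(perm)-1): if T[perm[k]][perm[k+1]] != 1: valid=False; break
def pvValidA (T : List (List Int)) : List Int → Bool
  | a :: b :: rest => (pvGetT T a b == 1) && pvValidA T (b :: rest)
  | _ => true

-- the counting loop: for k in range(len(perm)-1): if perm[k]==i and perm[k+1]==j: count += 1
def pvAdjLoopA (i j : Int) : Int → List Int → Int
  | c, a :: b :: rest => pvAdjLoopA i j (if a = i ∧ b = j then c + 1 else c) (b :: rest)
  | c, _ => c

def adj_count (T : List (List Int)) (i : Int) (j : Int) (excluded_vertices : Option (List Int)) : Int :=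
  let verts := pvVerts T excluded_vertices
  (PySem.List.permutations verts verts.length).foldl
    (fun count perm => if pvValidA T perm then pvAdjLoopA i j count perm else count) 0

-- ===== PORT B =====
-- enumerate(remaining) with the element removed: [(v, remaining[:k]+remaining[k+1:]) for k, v]
def pvPick : List Int → List (Int × List Int)
  | [] => []
  | v :: rest => (v, rest) :: (pvPick rest).map (fun p => (p.1, v :: p.2))

-- go(last, remaining, seen); the Nat argument is the fuel len(remaining) making recursion structural
def pvGo (T : List (List Int)) (i j : Int) : Nat → Int → List Int → Bool → Int
  | 0, _, _, seen => if seen then 1 else 0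
  | fuel + 1, last, remaining, seen =>
      (pvPick remaining).foldl
        (fun total p =>
          if pvGetT T last p.1 == 1 then
            total + pvGo T i j fuel p.1 p.2 (seen || (last == i && p.1 == j))
          else total) 0

def adj_count_alt (T : List (List Int)) (i : Int) (j : Int) (excluded_vertices : Option (List Int)) : Int :=
  let verts := pvVerts T excluded_vertices
  match verts with
  | [] => 0
  | _ => (pvPick verts).foldl
      (fun total p => total + pvGo T i j p.2.length p.1 p.2 false) 0

-- ===== PRECONDITION & SPEC =====
-- Pre_ holds exactly when Python A returns: with at least two surviving vertices, every pair
-- u ≠ v of them is probed as T[u][v] by some permutation, so A raises IndexError iff some such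
-- entry is missing (rows reached via at most one vertex never need full length).
def Pre_adj_count (T : List (List Int)) (i : Int) (j : Int) (excluded_vertices : Option (List Int)) : Prop :=
  (pvVerts T excluded_vertices).length ≤ 1 ∨
    ∀ u ∈ pvVerts T excluded_vertices, ∀ v ∈ pvVerts T excluded_vertices,
      u ≠ v → v < ((PySem.List.pyGetD T u ([] : List Int)).length : Int)
instance (T : List (List Int)) (i : Int) (j : Int) (excluded_vertices : Option (List Int)) : Decidable (Pre_adj_count T i j excluded_vertices) := by unfold Pre_adj_count; infer_instance

def pvWitness_adj_count : List (List Int) × Int × Int × Option (List Int) :=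
  ([[0, 1], [1, 0]], 0, 1, none)

def Spec_adj_count (T : List (List Int)) (i : Int) (j : Int) (excluded_vertices : Option (List Int)) (out : Int) : Prop := out = adj_count_alt T i j excluded_vertices
instance (T : List (List Int)) (i : Int) (j : Int) (excluded_vertices : Option (List Int)) (out : Int) : Decidable (Spec_adj_count T i j excluded_vertices out) := by unfold Spec_adj_count; infer_instance

-- ===== CLAIM (what is proved, stated in full; the proofs are below) =====
def Claim_equal_adj_count : Prop := ∀ (T : List (List Int)) (i : Int) (j : Int) (excluded_vertices : Option (List Int)), Dom_adj_count T i j excluded_vertices → Pre_adj_count T i j excluded_vertices → Spec_adj_count T i j excluded_vertices (adj_count T i j excluded_vertices)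

-- ===== LEMMAS AND PROOFS =====

-- generic: a foldl whose body is "accumulator plus a contribution" is a sum
theorem pv_foldl_sum {α : Type} (g : Int → α → Int) (hg : ∀ c x, g c x = c + g 0 x) :
    ∀ (l : List α) (c : Int), l.foldl g c = c + (l.map (g 0)).sum := by
  intro l
  induction l with
  | nil => intro c; simp
  | cons x xs ih => intro c; simp [List.foldl_cons, hg c x, ih]; ring

-- accumulator lemma for A's counting loop
theorem pvAdjLoopA_acc (i j : Int) :
    ∀ (p : List Int) (c : Int), pvAdjLoopA i j c p = c + pvAdjLoopA i j 0 p := by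
  intro p
  induction p with
  | nil => intro c; simp [pvAdjLoopA]
  | cons a rest ih =>
    intro c
    cases rest with
    | nil => simp [pvAdjLoopA]
    | cons b r =>
      simp only [pvAdjLoopA]
      rw [ih, ih (if a = i ∧ b = j then 0 + 1 else 0)]
      split_ifs <;> ring

-- boolean "perm contains i immediately before j"
def pvHasAdj (i j : Int) : List Int → Bool
  | a :: b :: rest => (a == i && b == j) || pvHasAdj i j (b :: rest)
  | _ => false

theorem pvAdjLoopA_not_mem (i j : Int) :
    ∀ (p : List Int), i ∉ p → pvAdjLoopA i j 0 p = 0 ∧ pvHasAdj i j p = false := by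
  intro p
  induction p with
  | nil => intro _; simp [pvAdjLoopA, pvHasAdj]
  | cons a rest ih =>
    intro h
    cases rest with
    | nil => simp [pvAdjLoopA, pvHasAdj]
    | cons b r =>
      have ha : a ≠ i := fun e => h (by simp [e])
      have ht := ih (fun e => h (List.mem_cons_of_mem a e))
      simp only [pvAdjLoopA, pvHasAdj]
      rw [if_neg (fun e => ha e.1)]
      simp [ht.1, ht.2, ha]

theorem pvAdjLoopA_nodup (i j : Int) :
    ∀ (p : List Int), p.Nodup → pvAdjLoopA i j 0 p = if pvHasAdj i j p then 1 else 0 := by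
  intro p
  induction p with
  | nil => intro _; simp [pvAdjLoopA, pvHasAdj]
  | cons a rest ih =>
    intro hnd
    cases rest with
    | nil => simp [pvAdjLoopA, pvHasAdj]
    | cons b r =>
      simp only [pvAdjLoopA, pvHasAdj]
      by_cases hij : a = i ∧ b = j
      · have hi : i ∉ b :: r := by
          rw [← hij.1]; exact (List.nodup_cons.mp hnd).1
        have ht := pvAdjLoopA_not_mem i j (b :: r) hi
        rw [if_pos hij, pvAdjLoopA_acc, ht.1]
        simp [hij.1, hij.2]
      · have : (a == i && b == j) = false := by
          rcases (not_and_or.mp hij) with h | h <;> simp [h]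
        rw [if_neg hij, ih (List.nodup_cons.mp hnd).2]
        simp [this]

-- pvPick l lists (l[k], l with index k removed) for k = 0 .. len-1, in order
theorem pvPick_eq : ∀ (l : List Int),
    pvPick l = (List.range l.length).map (fun k => (l.getD k 0, l.eraseIdx k)) := by
  intro l
  induction l with
  | nil => simp [pvPick]
  | cons v rest ih =>
    simp only [pvPick, ih, List.length_cons, List.range_succ_eq_map, List.map_cons,
      List.map_map, List.getD_cons_zero, List.eraseIdx_cons_zero]
    refine congrArg (List.cons (v, rest)) ?_
    apply List.map_congr_left; intro k _; simp [Function.comp]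

theorem pvPick_mem_length {l : List Int} {v : Int} {o : List Int}
    (h : (v, o) ∈ pvPick l) : o.length + 1 = l.length := by
  rw [pvPick_eq] at h
  simp only [List.mem_map, List.mem_range] at h
  obtain ⟨k, hk, he⟩ := h
  injection he with h1 h2
  subst h2
  simp [List.length_eraseIdx, hk]
  omega

-- sum over a flatMap is a sum of sums
theorem pv_sum_flatMap {α : Type} (f : α → List Int) (l : List α) :
    (l.flatMap f).sum = (l.map (fun x => (f x).sum)).sum := by
  induction l with
  | nil => simp
  | cons x xs ih => simp [List.flatMap_cons, List.sum_append, ih]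

-- PySem permutations of a nonempty list, one level unfolded through pvPick
theorem pv_perms_eq (l : List Int) (h : l ≠ []) :
    PySem.List.permutations l l.length
      = (pvPick l).flatMap
          (fun p => (PySem.List.permutations p.2 p.2.length).map (fun q => p.1 :: q)) := by
  cases l with
  | nil => exact absurd rfl h
  | cons a as =>
    rw [List.length_cons, PySem.List.permutations_succ, pvPick_eq, List.flatMap_map]
    apply List.flatMap_congr
    intro k hk
    rw [List.mem_range] at hk
    have hget : (a :: as)[k]? = some ((a :: as).getD k 0) := by
      rw [List.getElem?_eq_getElem hk, List.getD_eq_getElem?_getD,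
        List.getElem?_eq_getElem hk]
      rfl
    have hlen : ((a :: as).eraseIdx k).length = as.length := by
      have hk' : k < as.length + 1 := by simpa using hk
      simp [List.length_eraseIdx, hk']
    rw [hget]
    simp only [hlen]

-- the DFS computes the permutation sum with an indicator weight
theorem pvGo_eq (T : List (List Int)) (i j : Int) :
    ∀ (fuel : Nat) (last : Int) (rem : List Int) (seen : Bool), rem.length = fuel →
      pvGo T i j fuel last rem seen
        = ((PySem.List.permutations rem rem.length).map
            (fun p => if pvValidA T (last :: p) then
                (if seen || pvHasAdj i j (last :: p) then 1 else 0) else 0)).sum := by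
  intro fuel
  induction fuel with
  | zero =>
    intro last rem seen hlen
    have hrem : rem = [] := List.eq_nil_of_length_eq_zero hlen
    subst hrem
    simp [pvGo, pvValidA, pvHasAdj]
  | succ fuel ih =>
    intro last rem seen hlen
    have hne : rem ≠ [] := by intro e; subst e; simp at hlen
    simp only [pvGo]
    rw [pv_foldl_sum _
      (by intro c x; by_cases hc : pvGetT T last x.1 == 1 <;> simp [hc]),
      pv_perms_eq rem hne, List.map_flatMap, pv_sum_flatMap, zero_add]
    apply congrArg List.sum
    apply List.map_congr_left
    intro p hp
    have hplen : p.2.length = fuel := by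
      have := pvPick_mem_length hp; omega
    by_cases he : pvGetT T last p.1 == 1
    · rw [if_pos he, zero_add, ih p.1 p.2 _ hplen, List.map_map]
      apply congrArg List.sum
      apply List.map_congr_left
      intro q _
      simp [Function.comp, pvValidA, pvHasAdj, he, Bool.or_assoc]
    · rw [if_neg he, List.map_map]
      refine (List.sum_eq_zero ?_).symm
      intro x hx
      rw [List.mem_map] at hx
      obtain ⟨q, hq, rfl⟩ := hx
      simp only [Function.comp, pvValidA]
      simp [he]

theorem adj_count_eq_alt (T : List (List Int)) (i : Int) (j : Int)
    (excluded_vertices : Option (List Int)) :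
    adj_count T i j excluded_vertices = adj_count_alt T i j excluded_vertices := by
  cases hv : pvVerts T excluded_vertices with
  | nil =>
    simp [adj_count, adj_count_alt, hv, pvValidA, pvAdjLoopA]
  | cons a as =>
    have hnd : (pvVerts T excluded_vertices).Nodup :=
      List.Nodup.filter _ (PySem.List.nodup_pyRange_one 0 (T.length : Int))
    rw [hv] at hnd
    simp only [adj_count, adj_count_alt, hv]
    rw [pv_foldl_sum _
      (by intro c p; by_cases hval : pvValidA T p <;>
            simp [hval, pvAdjLoopA_acc i j p c]),
      pv_foldl_sum (fun (total : Int) (p : Int × List Int) =>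
        total + pvGo T i j p.2.length p.1 p.2 false) (by intro c p; simp),
      zero_add, zero_add]
    have hstep : ((PySem.List.permutations (a :: as) (a :: as).length).map
        (fun p => if pvValidA T p then pvAdjLoopA i j 0 p else 0)).sum
        = ((PySem.List.permutations (a :: as) (a :: as).length).map
            (fun p => if pvValidA T p then (if pvHasAdj i j p then (1:Int) else 0) else 0)).sum := by
      apply congrArg List.sum
      apply List.map_congr_left
      intro p hp
      have hpnd : p.Nodup :=
        (PySem.List.perm_of_mem_permutations hp).nodup_iff.mpr hnd
      rw [pvAdjLoopA_nodup i j p hpnd]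
    rw [hstep, pv_perms_eq _ (by simp), List.map_flatMap, pv_sum_flatMap]
    apply congrArg List.sum
    apply List.map_congr_left
    intro p hp
    rw [zero_add, pvGo_eq T i j p.2.length p.1 p.2 false rfl, List.map_map]
    apply congrArg List.sum
    apply List.map_congr_left
    intro q _
    simp [Function.comp]

-- ===== VERDICT (by name: the statement is the Claim_ definition above) =====
theorem adj_count_spec : Claim_equal_adj_count := by
  intro T i j ex _ _
  unfold Spec_adj_count
  exact adj_count_eq_alt T i j ex
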